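-- pv_equiv track=rewrite | github.com/thomasgladwin/webapps | textCoder_funcs.py | lists_to_dict
-- ===== SOURCE A (Python) =====
-- def lists_to_dict(subject_list, attr_list):
--     Knowledge = {}
--     for n in range(len(subject_list)):
--         subject = subject_list[n]
--         if subject not in Knowledge.keys():
--             Knowledge.update({subject: attr_list[n]})
--         else:
--             Knowledge[subject] = Knowledge[subject] + attr_list[n]
--     return Knowledge
-- ===== SOURCE B (Python) =====
-- def lists_to_dict(subject_list, attr_list):
--     # Pass 1: group the attr lists by subject, in first-appearance order.
--     groups = {}
--     for n in range(len(subject_list)):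
--         groups.setdefault(subject_list[n], []).append(attr_list[n])
--     # Pass 2: fold each group's chunks together with '+'.
--     result = {}
--     for subject, chunks in groups.items():
--         acc = chunks[0]
--         for chunk in chunks[1:]:
--             acc = acc + chunk
--         result[subject] = acc
--     return result
-- ===== Notes on version B (the rewrite author's own statement) =====
-- stated objective: alternative
-- what changed: B first groups the attr chunks per subject into lists (setdefault+append) and then folds each group with '+' in a second pass, instead of A's single pass that keeps a running concatenation per key.
import Mathlib
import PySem

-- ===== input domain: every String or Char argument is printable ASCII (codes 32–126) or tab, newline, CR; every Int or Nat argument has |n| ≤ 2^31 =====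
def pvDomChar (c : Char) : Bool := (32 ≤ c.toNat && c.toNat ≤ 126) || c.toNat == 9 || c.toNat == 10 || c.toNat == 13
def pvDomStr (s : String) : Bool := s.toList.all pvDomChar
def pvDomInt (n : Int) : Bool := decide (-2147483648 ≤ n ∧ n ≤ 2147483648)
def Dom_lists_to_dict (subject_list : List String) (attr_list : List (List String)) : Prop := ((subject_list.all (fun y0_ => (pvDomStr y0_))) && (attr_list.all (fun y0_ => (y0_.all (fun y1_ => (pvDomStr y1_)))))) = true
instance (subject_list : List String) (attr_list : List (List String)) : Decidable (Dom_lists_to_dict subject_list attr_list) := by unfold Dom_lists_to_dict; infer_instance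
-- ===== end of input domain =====

-- B groups the attr chunks per subject first and folds each group afterwards, instead of
-- keeping a running concatenation in one pass (objective: alternative decomposition).

-- ===== PORT A =====
-- 'for n in range(len(subject_list))': bounds 0..len, step 1, so List.range is exact here;
-- subject_list[n] with 0 ≤ n < len(subject_list) is List.getD (index always in range);
-- attr_list[n] raises IndexError iff n ≥ len(attr_list) — exactly the inputs Pre_ excludes;
-- Knowledge[subject] is looked up only when the key is present, so getD [] is exact.
def lists_to_dict (subject_list : List String) (attr_list : List (List String)) : List (String × List String) :=
  ((List.range subject_list.length).foldl
    (fun Knowledge n =>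
      let subject := subject_list.getD n ""
      if Knowledge.contains subject = false then
        Knowledge.insert subject (attr_list.getD n [])
      else
        Knowledge.insert subject (Knowledge.getD subject [] ++ attr_list.getD n []))
    (PySem.Dict.empty : PySem.Dict String (List String))).items

-- ===== PORT B =====
-- 'acc = chunks[0]; for chunk in chunks[1:]: acc = acc + chunk' — chunks is nonempty at every
-- call site (each group holds at least one chunk), so headD/drop are exact for chunks[0]/chunks[1:].
def pvReduceAdd (chunks : List (List String)) : List String :=
  (chunks.drop 1).foldl (fun acc chunk => acc ++ chunk) (chunks.headD [])

-- groups.setdefault(s, []).append(a) is exactly groups[s] = groups.get(s, []) + [a] = Dict.modify.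
def lists_to_dict_alt (subject_list : List String) (attr_list : List (List String)) : List (String × List String) :=
  let groups := (List.range subject_list.length).foldl
    (fun groups n =>
      groups.modify (subject_list.getD n "") [] (fun l => l ++ [attr_list.getD n []]))
    (PySem.Dict.empty : PySem.Dict String (List (List String)))
  (groups.items.foldl
    (fun result p => result.insert p.1 (pvReduceAdd p.2))
    (PySem.Dict.empty : PySem.Dict String (List String))).items

-- ===== PRECONDITION & SPEC =====
-- Pre_ excludes exactly the inputs where attr_list is shorter than subject_list: there both
-- Pythons raise IndexError at attr_list[n].
def Pre_lists_to_dict (subject_list : List String) (attr_list : List (List String)) : Prop :=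
  subject_list.length ≤ attr_list.length
instance (subject_list : List String) (attr_list : List (List String)) : Decidable (Pre_lists_to_dict subject_list attr_list) := by unfold Pre_lists_to_dict; infer_instance

def pvWitness_lists_to_dict : List String × List (List String) :=
  (["a", "b", "a"], [["x"], ["y", "z"], ["w"]])

def Spec_lists_to_dict (subject_list : List String) (attr_list : List (List String)) (out : List (String × List String)) : Prop := out = lists_to_dict_alt subject_list attr_list
instance (subject_list : List String) (attr_list : List (List String)) (out : List (String × List String)) : Decidable (Spec_lists_to_dict subject_list attr_list out) := by unfold Spec_lists_to_dict; infer_instance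

-- ===== CLAIM (what is proved, stated in full; the proofs are below) =====
def Claim_equal_lists_to_dict : Prop := ∀ (subject_list : List String) (attr_list : List (List String)), Dom_lists_to_dict subject_list attr_list → Pre_lists_to_dict subject_list attr_list → Spec_lists_to_dict subject_list attr_list (lists_to_dict subject_list attr_list)

-- ===== LEMMAS AND PROOFS =====

-- pvReduceAdd concatenates the group's chunks.
theorem pvReduceAdd_eq_flatten (l : List (List String)) : pvReduceAdd l = l.flatten := by
  cases l with
  | nil => rfl
  | cons h t => simp [pvReduceAdd, PySem.List.foldl_append_eq_flatten]

-- an index loop over range(len(xs)) reading xs[n] and ys[n] is a fold over xs.zip ys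
theorem pv_foldl_range_two {γ : Type} (f : γ → String → List String → γ) :
    ∀ (xs : List String) (ys : List (List String)), xs.length ≤ ys.length → ∀ (init : γ),
      (List.range xs.length).foldl (fun acc n => f acc (xs.getD n "") (ys.getD n [])) init
        = (xs.zip ys).foldl (fun acc p => f acc p.1 p.2) init := by
  intro xs
  induction xs with
  | nil => intro ys _ init; simp
  | cons x xt ih =>
    intro ys h init
    cases ys with
    | nil => simp at h
    | cons y yt =>
      simp only [List.length_cons, List.range_succ_eq_map, List.foldl_cons, List.foldl_map,
        List.getD_cons_zero, List.zip_cons_cons]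
      have := ih yt (by simpa using h) (f init x y)
      simpa [Nat.succ_eq_add_one, List.getD_cons_succ] using this

-- keys agree between a dict and its per-entry flattened image
theorem pv_keys_eq (g : PySem.Dict String (List (List String))) (d : PySem.Dict String (List String))
    (h : d.items = g.items.map (fun p => (p.1, p.2.flatten))) : d.keys = g.keys := by
  show d.items.map Prod.fst = g.items.map Prod.fst
  rw [h, List.map_map]
  rfl

theorem pv_contains_eq (g : PySem.Dict String (List (List String))) (d : PySem.Dict String (List String))
    (h : d.items = g.items.map (fun p => (p.1, p.2.flatten))) (s : String) :
    d.contains s = g.contains s := by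
  rw [PySem.Dict.contains_eq_decide_mem_keys, PySem.Dict.contains_eq_decide_mem_keys,
    pv_keys_eq g d h]

theorem pv_getD_eq (g : PySem.Dict String (List (List String))) (d : PySem.Dict String (List String))
    (h : d.items = g.items.map (fun p => (p.1, p.2.flatten))) (hnd : g.keys.Nodup) (s : String) :
    d.getD s [] = (g.getD s []).flatten := by
  cases hc : g.contains s with
  | false =>
    rw [PySem.Dict.getD_of_not_contains _ _ ((pv_contains_eq g d h s).trans hc),
      PySem.Dict.getD_of_not_contains _ _ hc]
    rfl
  | true =>
    rw [PySem.Dict.contains_eq_isSome_get?] at hc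
    obtain ⟨v, hv⟩ := Option.isSome_iff_exists.mp hc
    have hmem := PySem.Dict.mem_items_of_get?_eq_some g hv
    have hdm : (s, v.flatten) ∈ d.items := by
      rw [h]
      exact List.mem_map.mpr ⟨(s, v), hmem, rfl⟩
    have hdnd : d.keys.Nodup := by rw [pv_keys_eq g d h]; exact hnd
    rw [PySem.Dict.getD_of_mem_items d hdm hdnd,
      PySem.Dict.getD_of_mem_items g hmem hnd]

-- loop invariant: A's running dict is B's group dict with each value-list flattened
theorem pv_inv :
    ∀ (pairs : List (String × List String))
      (g : PySem.Dict String (List (List String))) (d : PySem.Dict String (List String)),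
      g.keys.Nodup → d.items = g.items.map (fun p => (p.1, p.2.flatten)) →
      (pairs.foldl (fun K p =>
          if K.contains p.1 = false then K.insert p.1 p.2
          else K.insert p.1 (K.getD p.1 [] ++ p.2)) d).items
        = ((pairs.foldl (fun G p => G.modify p.1 [] (fun l => l ++ [p.2])) g).items.map
            (fun p => (p.1, p.2.flatten)))
      ∧ (pairs.foldl (fun G p => G.modify p.1 [] (fun l => l ++ [p.2])) g).keys.Nodup := by
  intro pairs
  induction pairs with
  | nil => intro g d hnd h; exact ⟨h, hnd⟩
  | cons p pt ih =>
    intro g d hnd h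
    simp only [List.foldl_cons]
    have hmod : g.modify p.1 [] (fun l => l ++ [p.2])
        = g.insert p.1 (g.getD p.1 [] ++ [p.2]) := rfl
    have hnd' : (g.modify p.1 [] (fun l => l ++ [p.2])).keys.Nodup := by
      have := PySem.Dict.nodup_keys_foldl_modify_key [p] (fun q => q.1) []
        (fun _ q l => l ++ [q.2]) g hnd
      simpa using this
    apply ih _ _ hnd'
    rw [hmod]
    cases hc : g.contains p.1 with
    | false =>
      have hcd : d.contains p.1 = false := (pv_contains_eq g d h p.1).trans hc
      rw [if_pos hcd]
      rw [PySem.Dict.items_insert_of_not_contains d _ hcd,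
        PySem.Dict.items_insert_of_not_contains g _ hc,
        PySem.Dict.getD_of_not_contains g _ hc, h]
      simp
    | true =>
      have hcd : d.contains p.1 = true := (pv_contains_eq g d h p.1).trans hc
      rw [if_neg (by simp [hcd])]
      rw [PySem.Dict.items_insert_of_contains d _ hcd,
        PySem.Dict.items_insert_of_contains g _ hc, h, List.map_map, List.map_map]
      apply List.map_congr_left
      intro q _
      rcases Decidable.em (q.1 = p.1) with hq | hq
      · simp [hq, pv_getD_eq g d h hnd]
      · simp [hq]

-- ===== VERDICT (by name: the statement is the Claim_ definition above) =====
theorem lists_to_dict_spec : Claim_equal_lists_to_dict := by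
  intro subject_list attr_list _ hpre
  unfold Spec_lists_to_dict lists_to_dict lists_to_dict_alt
  simp only []
  rw [pv_foldl_range_two (γ := PySem.Dict String (List String)) (fun K s a =>
        if K.contains s = false then K.insert s a
        else K.insert s (K.getD s [] ++ a)) subject_list attr_list hpre,
    pv_foldl_range_two (γ := PySem.Dict String (List (List String))) (fun G s a => G.modify s [] (fun l => l ++ [a]))
      subject_list attr_list hpre]
  obtain ⟨hitems, hnd⟩ := pv_inv (subject_list.zip attr_list)
    PySem.Dict.empty PySem.Dict.empty (by simp) (by rfl)
  rw [hitems]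
  have hnd' : ((List.foldl (fun G p => G.modify p.1 [] fun l => l ++ [p.2])
      PySem.Dict.empty (subject_list.zip attr_list)).items.map (fun p => p.1)).Nodup := hnd
  rw [PySem.Dict.items_foldl_insert_fresh
    (List.foldl (fun G p => G.modify p.1 [] fun l => l ++ [p.2])
      PySem.Dict.empty (subject_list.zip attr_list)).items
    (fun p => p.1) (fun p => pvReduceAdd p.2)
    PySem.Dict.empty (fun a _ => rfl) hnd']
  simp [pvReduceAdd_eq_flatten]
  rfl
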